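-- pv_equiv track=rewrite | github.com/smallbee3/algorithm-study | hellocoding/5_primenumber.py | alphabet_to_prime
-- ===== SOURCE A (Python) =====
-- def prime_check(num):
--     if num == 1:
--         return False
--     for i in range(2, num):
--         if num % i == 0:
--             return False
--     return True
--
-- def prime_list(num):
--     count = 0
--     start = 1
--     list = []
--     while count < num:
--         if prime_check(start):
--             list.append(start)
--             count += 1
--         start += 1
--     return list
--
-- HASHTABLE_SIZE = 10
--
-- def alphabet_to_prime(str):
--     list52 = prime_list(52)
--
--     # Alphabet - primenumber Hash table 만들기
--     hash_table = {}
--     for i, j in enumerate(['A', 'a', 'B', 'b', 'C', 'c', 'D', 'd', 'E', 'e', 'F', 'f', 'G', 'g', 'H', 'h', 'I', 'i', 'J', 'j', 'K', 'k', 'L', 'l', 'M', 'm', 'N', 'n', 'O', 'o', 'P', 'p', 'Q', 'q', 'R', 'r', 'S', 's', 'T', 't', 'U', 'u', 'V', 'v', 'W', 'w', 'X', 'x', 'Y', 'y', 'Z', 'z']):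
--         hash_table[j] = list52[i]
--     sum = 0
--     for i in str:
--         sum += hash_table[i]
--     return sum % HASHTABLE_SIZE
-- ===== SOURCE B (Python) =====
-- def alphabet_to_prime(str):
--     bound = 240
--     is_comp = [False] * (bound + 1)
--     primes = []
--     for n in range(2, bound + 1):
--         if not is_comp[n]:
--             primes.append(n)
--             for m in range(n * n, bound + 1, n):
--                 is_comp[m] = True
--     letters = 'AaBbCcDdEeFfGgHhIiJjKkLlMmNnOoPpQqRrSsTtUuVvWwXxYyZz'
--     table = dict(zip(letters, primes[:52]))
--     return sum(table[c] for c in str) % 10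
-- ===== Notes on version B (the rewrite author's own statement) =====
-- stated objective: alternative
-- what changed: Replaces the per-number trial-division prime generation (prime_check/prime_list while-loop) with a Sieve of Eratosthenes up to 240 and builds the letter-to-prime table via dict(zip(...)); the letter sum and % 10 are unchanged.
import Mathlib
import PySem

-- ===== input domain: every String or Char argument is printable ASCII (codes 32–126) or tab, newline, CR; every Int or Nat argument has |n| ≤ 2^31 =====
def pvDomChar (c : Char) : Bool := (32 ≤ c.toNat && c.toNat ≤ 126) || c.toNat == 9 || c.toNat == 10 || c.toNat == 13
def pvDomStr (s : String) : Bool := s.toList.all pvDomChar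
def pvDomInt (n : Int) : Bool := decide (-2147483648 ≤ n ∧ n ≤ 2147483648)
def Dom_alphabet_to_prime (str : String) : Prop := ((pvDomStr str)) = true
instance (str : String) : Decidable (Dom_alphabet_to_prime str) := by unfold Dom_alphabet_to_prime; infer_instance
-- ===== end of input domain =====

-- B replaces A's trial-division prime generation with a Sieve of Eratosthenes (same constant table, same sum loop); agreement on letter-only strings proved.
-- A raises KeyError on any character outside A-Za-z; Pre_ excludes those (B raises there too).

-- ===== PORT A =====
-- helper: prime_check(num) — trial division over range(2, num) with early return (list.all short-circuits like the loop)
def prime_check (num : Int) : Bool :=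
  if num = 1 then false
  else (PySem.List.pyRange 2 num 1).all (fun i => !(PySem.Int.mod num i == 0))

-- helper: the while-loop body of prime_list, made total with fuel (1000 steps suffice: the loop runs 239 iterations)
def primeListAux : Nat → Int → Int → Int → List Int → List Int
  | 0, _, _, _, acc => acc
  | fuel+1, num, count, start, acc =>
    if count < num then
      if prime_check start then primeListAux fuel num (count + 1) (start + 1) (acc ++ [start])
      else primeListAux fuel num count (start + 1) acc
    else acc

def prime_list (num : Int) : List Int := primeListAux 1000 num 0 1 []

def HASHTABLE_SIZE : Int := 10

def pvLettersA : List Char := ['A', 'a', 'B', 'b', 'C', 'c', 'D', 'd', 'E', 'e', 'F', 'f', 'G', 'g', 'H', 'h', 'I', 'i', 'J', 'j', 'K', 'k', 'L', 'l', 'M', 'm', 'N', 'n', 'O', 'o', 'P', 'p', 'Q', 'q', 'R', 'r', 'S', 's', 'T', 't', 'U', 'u', 'V', 'v', 'W', 'w', 'X', 'x', 'Y', 'y', 'Z', 'z']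

-- helper: the hash-table-building for-loop of A (enumerate + insert; list52[i] is an in-range index, pyGetD default never used)
def pvHashTableA : PySem.Dict Char Int :=
  let list52 := prime_list 52
  (PySem.List.enumerate pvLettersA).foldl
    (fun d ij => d.insert ij.2 (PySem.List.pyGetD list52 ij.1 0)) PySem.Dict.empty

def alphabet_to_prime (str : String) : Int :=
  let hash_table := pvHashTableA
  let sum := str.toList.foldl (fun s c => s + hash_table.getD c 0) 0
  PySem.Int.mod sum HASHTABLE_SIZE

-- ===== PORT B =====
-- helper: the sieve loops of B (outer for over range(2, 241); inner marking for over range(n*n, 241, n))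
def pvSievePrimes : List Int :=
  let bound : Int := 240
  (((PySem.List.pyRange 2 (bound + 1) 1).foldl
    (fun (st : List Bool × List Int) n =>
      if PySem.List.pyGetD st.1 n false then st
      else ((PySem.List.pyRange (n * n) (bound + 1) n).foldl
              (fun comp m => PySem.List.pySetD comp m true) st.1,
            st.2 ++ [n]))
    (List.replicate 241 false, []))).2

def pvLettersB : List Char := "AaBbCcDdEeFfGgHhIiJjKkLlMmNnOoPpQqRrSsTtUuVvWwXxYyZz".toList

-- helper: table = dict(zip(letters, primes[:52]))
def pvTableB : PySem.Dict Char Int :=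
  PySem.Dict.ofList (pvLettersB.zip (pvSievePrimes.take 52))

def alphabet_to_prime_alt (str : String) : Int :=
  let table := pvTableB
  PySem.Int.mod (str.toList.foldl (fun s c => s + table.getD c 0) 0) 10

-- ===== PRECONDITION & SPEC =====
-- Pre_ excludes exactly the strings with a character outside A-Za-z, on which A raises KeyError.
def Pre_alphabet_to_prime (str : String) : Prop :=
  str.toList.all (fun c => (65 ≤ c.toNat && c.toNat ≤ 90) || (97 ≤ c.toNat && c.toNat ≤ 122)) = true
instance (str : String) : Decidable (Pre_alphabet_to_prime str) := by unfold Pre_alphabet_to_prime; infer_instance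

def pvWitness_alphabet_to_prime : String := "Az"

def Spec_alphabet_to_prime (str : String) (out : Int) : Prop := out = alphabet_to_prime_alt str
instance (str : String) (out : Int) : Decidable (Spec_alphabet_to_prime str out) := by unfold Spec_alphabet_to_prime; infer_instance

-- ===== CLAIM (what is proved, stated in full; the proofs are below) =====
def Claim_equal_alphabet_to_prime : Prop := ∀ (str : String), Dom_alphabet_to_prime str → Pre_alphabet_to_prime str → Spec_alphabet_to_prime str (alphabet_to_prime str)

-- ===== LEMMAS AND PROOFS =====

-- the two constant letter→prime tables coincide (both are the first 52 primes keyed by 'AaBb…Zz')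
set_option maxRecDepth 100000 in
theorem pv_tables_eq : pvHashTableA = pvTableB := by decide

theorem pv_witness_ok : Dom_alphabet_to_prime pvWitness_alphabet_to_prime ∧ Pre_alphabet_to_prime pvWitness_alphabet_to_prime := by decide

-- ===== VERDICT (by name: the statement is the Claim_ definition above) =====
theorem alphabet_to_prime_spec : Claim_equal_alphabet_to_prime := by
  intro str _ _
  unfold Spec_alphabet_to_prime alphabet_to_prime alphabet_to_prime_alt
  rw [pv_tables_eq]
  rfl
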